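-- pv_equiv track=rewrite | github.com/jomof/cloze-data | resources/grammar/toposort.py | find_minimal_constraint_cuts
-- ===== SOURCE A (Python) =====
-- from typing import List, Dict, Set, Tuple, Any, Optional
-- from typing import List, Dict, Set, Tuple, Any, Optional
--
-- def find_minimal_constraint_cuts(
--     current_list: List[str],
--     nodes_dict: Dict[str, Dict[str, List[str]]],
--     before_field: str = "before",
--     after_field: str = "after",
--     cut_all_backward_edges: bool = True
-- ) -> Tuple[List[Tuple[str, str, str]], Dict[str, Dict[str, List[str]]]]:
--     """
--     Find constraint edges to remove to make the DAG respect the current ordering.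
--
--     Args:
--         current_list: The desired order
--         nodes_dict: Original constraint data
--         before_field: Field name for items that should come before this node
--         after_field: Field name for items that should come after this node
--         cut_all_backward_edges: If True, cuts ALL edges that go backward in the ordering,
--                                even if they don't create violations (prevents future cycles)
--
--     Returns:
--         Tuple of (list_of_cuts, updated_nodes_dict)
--         where cuts are (from_node, to_node, constraint_type) tuples
--     """
--
--     # Create position mapping
--     positions = {item: i for i, item in enumerate(current_list)}
--
--     # Find all edges that go backward in our ordering
--     cuts_needed = []
--
--     for node, constraints in nodes_dict.items():
--         if node not in positions:
--             continue
--
--         node_pos = positions[node]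
--
--         # Check "before" constraints - these create edges FROM before_item TO node
--         for before_item in constraints.get(before_field, []):
--             if before_item in positions:
--                 before_pos = positions[before_item]
--                 # If before_item comes after node in our ordering, this edge goes backward
--                 if cut_all_backward_edges and before_pos > node_pos:
--                     cuts_needed.append((before_item, node, f"{node}.{before_field}", before_item))
--                 elif not cut_all_backward_edges and before_pos > node_pos:
--                     # Only cut if it creates a violation (original behavior)
--                     cuts_needed.append((before_item, node, f"{node}.{before_field}", before_item))
--
--         # Check "after" constraints - these create edges FROM node TO after_item
--         for after_item in constraints.get(after_field, []):
--             if after_item in positions: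
--                 after_pos = positions[after_item]
--                 # If after_item comes before node in our ordering, this edge goes backward
--                 if cut_all_backward_edges and after_pos < node_pos:
--                     cuts_needed.append((node, after_item, f"{node}.{after_field}", after_item))
--                 elif not cut_all_backward_edges and after_pos < node_pos:
--                     # Only cut if it creates a violation (original behavior)
--                     cuts_needed.append((node, after_item, f"{node}.{after_field}", after_item))
--
--     # Create updated nodes_dict with cuts applied
--     updated_nodes_dict = {}
--     for node, constraints in nodes_dict.items():
--         updated_constraints = {}
--
--         # Copy before constraints, removing cut ones
--         if before_field in constraints:
--             updated_before = []
--             for before_item in constraints[before_field]: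
--                 # Keep this constraint unless it's in our cuts
--                 should_cut = any(cut[0] == before_item and cut[1] == node and cut[3] == before_item
--                                for cut in cuts_needed)
--                 if not should_cut:
--                     updated_before.append(before_item)
--             updated_constraints[before_field] = updated_before
--
--         # Copy after constraints, removing cut ones
--         if after_field in constraints:
--             updated_after = []
--             for after_item in constraints[after_field]:
--                 # Keep this constraint unless it's in our cuts
--                 should_cut = any(cut[0] == node and cut[1] == after_item and cut[3] == after_item
--                                for cut in cuts_needed)
--                 if not should_cut:
--                     updated_after.append(after_item)
--             updated_constraints[after_field] = updated_after
--
--         # Copy any other fields unchanged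
--         for field, value in constraints.items():
--             if field not in [before_field, after_field]:
--                 updated_constraints[field] = value
--
--         updated_nodes_dict[node] = updated_constraints
--
--     # Remove the extra field from cuts_needed for return
--     cuts_cleaned = [(cut[0], cut[1], cut[2]) for cut in cuts_needed]
--
--     return cuts_cleaned, updated_nodes_dict
-- ===== SOURCE B (Python) =====
-- from typing import List, Dict, Tuple
--
-- def find_minimal_constraint_cuts(
--     current_list: List[str],
--     nodes_dict: Dict[str, Dict[str, List[str]]],
--     before_field: str = "before",
--     after_field: str = "after",
--     cut_all_backward_edges: bool = True
-- ) -> Tuple[List[Tuple[str, str, str]], Dict[str, Dict[str, List[str]]]]: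
--     # Single pass: for each node decide cuts and the filtered constraint lists together.
--     positions = {item: i for i, item in enumerate(current_list)}
--     cuts = []
--     updated = {}
--     for node, constraints in nodes_dict.items():
--         pos = positions.get(node)
--         new_c = {}
--         if before_field in constraints:
--             kept = []
--             for b in constraints[before_field]:
--                 if pos is not None and b in positions and positions[b] > pos:
--                     cuts.append((b, node, f"{node}.{before_field}"))
--                 else:
--                     kept.append(b)
--             new_c[before_field] = kept
--         if after_field in constraints:
--             kept = []
--             for a in constraints[after_field]:
--                 if pos is not None and a in positions and positions[a] < pos:
--                     cuts.append((node, a, f"{node}.{after_field}"))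
--                 else:
--                     kept.append(a)
--             new_c[after_field] = kept
--         for field, value in constraints.items():
--             if field not in (before_field, after_field):
--                 new_c[field] = value
--         updated[node] = new_c
--     return cuts, updated
-- ===== Notes on version B (the rewrite author's own statement) =====
-- stated objective: alternative
-- what changed: B makes a single pass over nodes_dict, deciding each constraint edge's cut and its removal from the node's before/after list at the same time from the position map, instead of A's two passes where the second rescans the whole cuts_needed list for every constraint item.
import Mathlib
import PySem

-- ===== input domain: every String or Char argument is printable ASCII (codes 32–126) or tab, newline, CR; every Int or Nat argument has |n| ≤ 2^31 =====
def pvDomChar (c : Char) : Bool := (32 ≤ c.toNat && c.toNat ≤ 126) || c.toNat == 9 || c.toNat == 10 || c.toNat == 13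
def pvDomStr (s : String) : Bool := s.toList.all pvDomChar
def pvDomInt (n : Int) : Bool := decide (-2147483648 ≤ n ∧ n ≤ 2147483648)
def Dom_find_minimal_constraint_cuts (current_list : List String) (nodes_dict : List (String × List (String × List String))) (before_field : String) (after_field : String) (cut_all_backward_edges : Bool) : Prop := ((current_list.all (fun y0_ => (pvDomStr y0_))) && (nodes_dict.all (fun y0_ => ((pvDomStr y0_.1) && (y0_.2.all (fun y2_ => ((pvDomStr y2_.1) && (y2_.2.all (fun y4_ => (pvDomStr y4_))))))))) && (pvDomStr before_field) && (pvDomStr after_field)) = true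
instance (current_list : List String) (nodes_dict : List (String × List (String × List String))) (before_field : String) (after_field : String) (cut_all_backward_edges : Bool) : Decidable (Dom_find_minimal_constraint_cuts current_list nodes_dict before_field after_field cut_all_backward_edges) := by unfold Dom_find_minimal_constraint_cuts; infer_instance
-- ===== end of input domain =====

-- B fuses A's two passes into one: each node's cuts and its filtered constraint lists are decided
-- together from the position map, so the second loop and its rescan of cuts_needed disappear (objective: alternative).


-- positions = {item: i for i, item in enumerate(current_list)} (identical in both Pythons)
def pvPositions (current_list : List String) : PySem.Dict String Int :=
  (PySem.List.enumerate current_list).foldl (fun d p => d.insert p.2 p.1) PySem.Dict.empty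

-- ===== PORT A =====
def find_minimal_constraint_cuts (current_list : List String) (nodes_dict : List (String × List (String × List String))) (before_field : String) (after_field : String) (cut_all_backward_edges : Bool) : (List (String × String × String)) × (List (String × List (String × List String))) :=
  let positions := pvPositions current_list
  let cuts_needed : List (String × String × String × String) :=
    nodes_dict.foldl (fun cuts e =>
      let node := e.1
      let constraints := PySem.Dict.mk e.2
      if positions.contains node then
        let node_pos := positions.getD node 0
        let cuts := (constraints.getD before_field []).foldl (fun cuts before_item =>
          if positions.contains before_item then
            let before_pos := positions.getD before_item 0
            if cut_all_backward_edges && decide (before_pos > node_pos) then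
              cuts ++ [(before_item, node, node ++ "." ++ before_field, before_item)]
            else if !cut_all_backward_edges && decide (before_pos > node_pos) then
              cuts ++ [(before_item, node, node ++ "." ++ before_field, before_item)]
            else cuts
          else cuts) cuts
        (constraints.getD after_field []).foldl (fun cuts after_item =>
          if positions.contains after_item then
            let after_pos := positions.getD after_item 0
            if cut_all_backward_edges && decide (after_pos < node_pos) then
              cuts ++ [(node, after_item, node ++ "." ++ after_field, after_item)]
            else if !cut_all_backward_edges && decide (after_pos < node_pos) then
              cuts ++ [(node, after_item, node ++ "." ++ after_field, after_item)]
            else cuts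
          else cuts) cuts
      else cuts) []
  let updated_nodes_dict : PySem.Dict String (List (String × List String)) :=
    nodes_dict.foldl (fun upd e =>
      let node := e.1
      let constraints := PySem.Dict.mk e.2
      let updated_constraints : PySem.Dict String (List String) := PySem.Dict.empty
      let updated_constraints :=
        if constraints.contains before_field then
          let updated_before := (constraints.getD before_field []).foldl (fun acc before_item =>
            let should_cut := cuts_needed.any (fun cut =>
              cut.1 == before_item && cut.2.1 == node && cut.2.2.2 == before_item)
            if !should_cut then acc ++ [before_item] else acc) []
          updated_constraints.insert before_field updated_before
        else updated_constraints
      let updated_constraints :=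
        if constraints.contains after_field then
          let updated_after := (constraints.getD after_field []).foldl (fun acc after_item =>
            let should_cut := cuts_needed.any (fun cut =>
              cut.1 == node && cut.2.1 == after_item && cut.2.2.2 == after_item)
            if !should_cut then acc ++ [after_item] else acc) []
          updated_constraints.insert after_field updated_after
        else updated_constraints
      let updated_constraints := constraints.items.foldl (fun uc fv =>
        if fv.1 == before_field || fv.1 == after_field then uc else uc.insert fv.1 fv.2) updated_constraints
      upd.insert node updated_constraints.items) PySem.Dict.empty
  let cuts_cleaned := cuts_needed.map (fun cut => (cut.1, cut.2.1, cut.2.2.1))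
  (cuts_cleaned, updated_nodes_dict.items)

-- ===== PORT B =====
def find_minimal_constraint_cuts_alt (current_list : List String) (nodes_dict : List (String × List (String × List String))) (before_field : String) (after_field : String) (cut_all_backward_edges : Bool) : (List (String × String × String)) × (List (String × List (String × List String))) :=
  let positions := pvPositions current_list
  let st := nodes_dict.foldl (fun st e =>
    let node := e.1
    let constraints := PySem.Dict.mk e.2
    let pos := positions.get? node
    let new_c : PySem.Dict String (List String) := PySem.Dict.empty
    let st1 :=
      if constraints.contains before_field then
        let ck := (constraints.getD before_field []).foldl (fun s b =>
          if pos.isSome && positions.contains b && decide (positions.getD b 0 > pos.getD 0) then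
            (s.1 ++ [(b, node, node ++ "." ++ before_field)], s.2)
          else (s.1, s.2 ++ [b])) (st.1, [])
        (ck.1, new_c.insert before_field ck.2)
      else (st.1, new_c)
    let st2 :=
      if constraints.contains after_field then
        let ck := (constraints.getD after_field []).foldl (fun s a =>
          if pos.isSome && positions.contains a && decide (positions.getD a 0 < pos.getD 0) then
            (s.1 ++ [(node, a, node ++ "." ++ after_field)], s.2)
          else (s.1, s.2 ++ [a])) (st1.1, [])
        (ck.1, st1.2.insert after_field ck.2)
      else (st1.1, st1.2)
    let new_c2 := constraints.items.foldl (fun uc fv =>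
      if fv.1 == before_field || fv.1 == after_field then uc else uc.insert fv.1 fv.2) st2.2
    (st2.1, st.2.insert node new_c2.items)) (([] : List (String × String × String)), (PySem.Dict.empty : PySem.Dict String (List (String × List String))))
  (st.1, st.2.items)

-- ===== PRECONDITION & SPEC =====
def Spec_find_minimal_constraint_cuts (current_list : List String) (nodes_dict : List (String × List (String × List String))) (before_field : String) (after_field : String) (cut_all_backward_edges : Bool) (out : (List (String × String × String)) × (List (String × List (String × List String)))) : Prop := out = find_minimal_constraint_cuts_alt current_list nodes_dict before_field after_field cut_all_backward_edges
instance (current_list : List String) (nodes_dict : List (String × List (String × List String))) (before_field : String) (after_field : String) (cut_all_backward_edges : Bool) (out : (List (String × String × String)) × (List (String × List (String × List String)))) : Decidable (Spec_find_minimal_constraint_cuts current_list nodes_dict before_field after_field cut_all_backward_edges out) := by unfold Spec_find_minimal_constraint_cuts; infer_instance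

-- ===== CLAIM (what is proved, stated in full; the proofs are below) =====
def Claim_equal_find_minimal_constraint_cuts : Prop := ∀ (current_list : List String) (nodes_dict : List (String × List (String × List String))) (before_field : String) (after_field : String) (cut_all_backward_edges : Bool), Dom_find_minimal_constraint_cuts current_list nodes_dict before_field after_field cut_all_backward_edges → Spec_find_minimal_constraint_cuts current_list nodes_dict before_field after_field cut_all_backward_edges (find_minimal_constraint_cuts current_list nodes_dict before_field after_field cut_all_backward_edges)

-- ===== LEMMAS AND PROOFS =====

-- canonical per-entry forms both ports are reduced to
def pvCondB (p : PySem.Dict String Int) (np : Int) (b : String) : Bool :=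
  p.contains b && decide (p.getD b 0 > np)
def pvCondA (p : PySem.Dict String Int) (np : Int) (a : String) : Bool :=
  p.contains a && decide (p.getD a 0 < np)

def pvCuts4 (p : PySem.Dict String Int) (bf af : String) (e : String × List (String × List String)) : List (String × String × String × String) :=
  if p.contains e.1 then
    (((PySem.Dict.mk e.2).getD bf []).filter (pvCondB p (p.getD e.1 0))).map (fun b => (b, e.1, e.1 ++ "." ++ bf, b))
    ++ (((PySem.Dict.mk e.2).getD af []).filter (pvCondA p (p.getD e.1 0))).map (fun a => (e.1, a, e.1 ++ "." ++ af, a))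
  else []

def pvCuts3 (p : PySem.Dict String Int) (bf af : String) (e : String × List (String × List String)) : List (String × String × String) :=
  (if (PySem.Dict.mk e.2).contains bf then
    (((PySem.Dict.mk e.2).getD bf []).filter (fun b => p.contains e.1 && pvCondB p (p.getD e.1 0) b)).map (fun b => (b, e.1, e.1 ++ "." ++ bf))
   else [])
  ++ (if (PySem.Dict.mk e.2).contains af then
    (((PySem.Dict.mk e.2).getD af []).filter (fun a => p.contains e.1 && pvCondA p (p.getD e.1 0) a)).map (fun a => (e.1, a, e.1 ++ "." ++ af))
   else [])

def pvUpd (p : PySem.Dict String Int) (bf af : String) (e : String × List (String × List String)) : List (String × List String) :=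
  let c := PySem.Dict.mk e.2
  let d0 : PySem.Dict String (List String) := PySem.Dict.empty
  let d1 := if c.contains bf then
      d0.insert bf ((c.getD bf []).filter (fun b => !(p.contains e.1 && pvCondB p (p.getD e.1 0) b)))
    else d0
  let d2 := if c.contains af then
      d1.insert af ((c.getD af []).filter (fun a => !(p.contains e.1 && pvCondA p (p.getD e.1 0) a)))
    else d1
  (c.items.foldl (fun uc fv => if fv.1 == bf || fv.1 == af then uc else uc.insert fv.1 fv.2) d2).items

lemma pv_fold_cut {T : Type} (cab : Bool) (p : PySem.Dict String Int) (q : String → Bool) (l : List String) (c4 : String → T) (cuts : List T) :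
    l.foldl (fun cuts b =>
      if p.contains b then
        if cab && q b then cuts ++ [c4 b]
        else if !cab && q b then cuts ++ [c4 b]
        else cuts
      else cuts) cuts
    = cuts ++ (l.filter (fun b => p.contains b && q b)).map c4 := by
  have hf : (fun (cuts : List T) b =>
      if p.contains b then
        if cab && q b then cuts ++ [c4 b]
        else if !cab && q b then cuts ++ [c4 b]
        else cuts
      else cuts)
      = (fun (cuts : List T) b => if (p.contains b && q b) then cuts ++ [c4 b] else cuts) := by
    funext cuts b
    cases hb : p.contains b <;> cases hq : q b <;> cases cab <;> simp
  rw [hf, PySem.List.foldl_append_if]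

def pvAcuts (p : PySem.Dict String Int) (bf af : String) (cab : Bool) (nd : List (String × List (String × List String))) : List (String × String × String × String) :=
    nd.foldl (fun cuts e =>
      let node := e.1
      let constraints := PySem.Dict.mk e.2
      if p.contains node then
        let node_pos := p.getD node 0
        let cuts := (constraints.getD bf []).foldl (fun cuts before_item =>
          if p.contains before_item then
            let before_pos := p.getD before_item 0
            if cab && decide (before_pos > node_pos) then
              cuts ++ [(before_item, node, node ++ "." ++ bf, before_item)]
            else if !cab && decide (before_pos > node_pos) then
              cuts ++ [(before_item, node, node ++ "." ++ bf, before_item)]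
            else cuts
          else cuts) cuts
        (constraints.getD af []).foldl (fun cuts after_item =>
          if p.contains after_item then
            let after_pos := p.getD after_item 0
            if cab && decide (after_pos < node_pos) then
              cuts ++ [(node, after_item, node ++ "." ++ af, after_item)]
            else if !cab && decide (after_pos < node_pos) then
              cuts ++ [(node, after_item, node ++ "." ++ af, after_item)]
            else cuts
          else cuts) cuts
      else cuts) []

lemma pv_cutsA (p : PySem.Dict String Int) (bf af : String) (cab : Bool) (nd : List (String × List (String × List String))) :
    pvAcuts p bf af cab nd = nd.flatMap (pvCuts4 p bf af) := by
  unfold pvAcuts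
  have hstep : (fun (cuts : List (String × String × String × String)) e =>
      let node := e.1
      let constraints := PySem.Dict.mk e.2
      if p.contains node then
        let node_pos := p.getD node 0
        let cuts := (constraints.getD bf []).foldl (fun cuts before_item =>
          if p.contains before_item then
            let before_pos := p.getD before_item 0
            if cab && decide (before_pos > node_pos) then
              cuts ++ [(before_item, node, node ++ "." ++ bf, before_item)]
            else if !cab && decide (before_pos > node_pos) then
              cuts ++ [(before_item, node, node ++ "." ++ bf, before_item)]
            else cuts
          else cuts) cuts
        (constraints.getD af []).foldl (fun cuts after_item =>
          if p.contains after_item then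
            let after_pos := p.getD after_item 0
            if cab && decide (after_pos < node_pos) then
              cuts ++ [(node, after_item, node ++ "." ++ af, after_item)]
            else if !cab && decide (after_pos < node_pos) then
              cuts ++ [(node, after_item, node ++ "." ++ af, after_item)]
            else cuts
          else cuts) cuts
      else cuts)
      = (fun cuts e => cuts ++ pvCuts4 p bf af e) := by
    funext cuts e
    show (if p.contains e.1 then _ else cuts) = _
    unfold pvCuts4
    cases h : p.contains e.1 with
    | false => simp
    | true =>
      simp only [if_true]
      rw [pv_fold_cut, pv_fold_cut]
      simp [List.append_assoc]
      have hB : (fun b => p.contains b && decide (p.getD e.1 0 < p.getD b 0)) = pvCondB p (p.getD e.1 0) := by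
        funext b; simp [pvCondB]
      have hA : (fun b => p.contains b && decide (p.getD b 0 < p.getD e.1 0)) = pvCondA p (p.getD e.1 0) := by
        funext b; simp [pvCondA]
      rw [hB, hA]
  rw [hstep, PySem.List.foldl_append_eq_flatMap]
  simp

lemma pv_shape4 (p : PySem.Dict String Int) (bf af : String) (e : String × List (String × List String))
    (c : String × String × String × String) (hc : c ∈ pvCuts4 p bf af e) :
    (c.2.1 = e.1 ∧ c.2.2.2 = c.1 ∧ p.contains e.1 = true ∧ p.contains c.1 = true ∧ p.getD e.1 0 < p.getD c.1 0)
    ∨ (c.1 = e.1 ∧ c.2.2.2 = c.2.1 ∧ p.contains e.1 = true ∧ p.contains c.2.1 = true ∧ p.getD c.2.1 0 < p.getD e.1 0) := by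
  unfold pvCuts4 at hc
  by_cases h : p.contains e.1 = true
  · simp only [h, if_true, List.mem_append, List.mem_map, List.mem_filter] at hc
    rcases hc with ⟨b, ⟨hbmem, hbc⟩, rfl⟩ | ⟨a, ⟨hamem, hac⟩, rfl⟩
    · left
      simp only [pvCondB, Bool.and_eq_true, decide_eq_true_eq] at hbc
      exact ⟨rfl, rfl, h, hbc.1, hbc.2⟩
    · right
      simp only [pvCondA, Bool.and_eq_true, decide_eq_true_eq] at hac
      exact ⟨rfl, rfl, h, hac.1, hac.2⟩
  · simp only [h] at hc
    simp at hc

lemma pv_loc_before (p : PySem.Dict String Int) (bf af : String) (nd : List (String × List (String × List String)))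
    (e : String × List (String × List String)) (he : e ∈ nd) (b : String)
    (hb : b ∈ (PySem.Dict.mk e.2).getD bf []) :
    (nd.flatMap (pvCuts4 p bf af)).any (fun c => c.1 == b && c.2.1 == e.1 && c.2.2.2 == b)
    = (p.contains e.1 && pvCondB p (p.getD e.1 0) b) := by
  rw [Bool.eq_iff_iff]
  simp only [List.any_eq_true, List.mem_flatMap, Bool.and_eq_true, beq_iff_eq, pvCondB,
    decide_eq_true_eq]
  constructor
  · rintro ⟨c, ⟨e', he', hc⟩, ⟨h1, h2⟩, h3⟩
    rcases pv_shape4 p bf af e' c hc with ⟨q1, q2, q3, q4, q5⟩ | ⟨q1, q2, q3, q4, q5⟩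
    · refine ⟨?_, ?_, ?_⟩
      · rw [← h2, q1]; exact q3
      · rw [← h1]; exact q4
      · show p.getD e.1 0 < p.getD b 0
        rw [← h1, ← h2, q1]; exact q5
    · exfalso
      have hbe : c.2.1 = c.1 := by rw [← q2, h3, ← h1]
      rw [hbe, q1] at q5
      exact absurd q5 (lt_irrefl _)
  · rintro ⟨h1, h2, h3⟩
    refine ⟨(b, e.1, e.1 ++ "." ++ bf, b), ⟨e, he, ?_⟩, ⟨rfl, rfl⟩, rfl⟩
    unfold pvCuts4
    simp only [h1, if_true, List.mem_append, List.mem_map, List.mem_filter]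
    left
    exact ⟨b, ⟨hb, by simp [pvCondB, h2, h3]⟩, rfl⟩

lemma pv_loc_after (p : PySem.Dict String Int) (bf af : String) (nd : List (String × List (String × List String)))
    (e : String × List (String × List String)) (he : e ∈ nd) (a : String)
    (ha : a ∈ (PySem.Dict.mk e.2).getD af []) :
    (nd.flatMap (pvCuts4 p bf af)).any (fun c => c.1 == e.1 && c.2.1 == a && c.2.2.2 == a)
    = (p.contains e.1 && pvCondA p (p.getD e.1 0) a) := by
  rw [Bool.eq_iff_iff]
  simp only [List.any_eq_true, List.mem_flatMap, Bool.and_eq_true, beq_iff_eq, pvCondA,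
    decide_eq_true_eq]
  constructor
  · rintro ⟨c, ⟨e', he', hc⟩, ⟨h1, h2⟩, h3⟩
    rcases pv_shape4 p bf af e' c hc with ⟨q1, q2, q3, q4, q5⟩ | ⟨q1, q2, q3, q4, q5⟩
    · exfalso
      have h4 : e'.1 = c.1 := by rw [← q1, h2, ← h3, q2]
      rw [h4] at q5
      exact absurd q5 (lt_irrefl _)
    · refine ⟨?_, ?_, ?_⟩
      · rw [← h1, q1]; exact q3
      · rw [← h2]; exact q4
      · rw [← h1, q1, ← h2]; exact q5
  · rintro ⟨h1, h2, h3⟩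
    refine ⟨(e.1, a, e.1 ++ "." ++ af, a), ⟨e, he, ?_⟩, ⟨rfl, rfl⟩, rfl⟩
    unfold pvCuts4
    simp only [h1, if_true, List.mem_append, List.mem_map, List.mem_filter]
    right
    exact ⟨a, ⟨ha, by simp [pvCondA, h2, h3]⟩, rfl⟩

lemma pv_cuts3_eq (p : PySem.Dict String Int) (bf af : String) (e : String × List (String × List String)) :
    (pvCuts4 p bf af e).map (fun c => (c.1, c.2.1, c.2.2.1)) = pvCuts3 p bf af e := by
  unfold pvCuts4 pvCuts3
  by_cases h : p.contains e.1 = true <;>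
    by_cases hbf : (PySem.Dict.mk e.2).contains bf = true <;>
      by_cases haf : (PySem.Dict.mk e.2).contains af = true <;>
        (simp [h, hbf, haf, PySem.Dict.getD_of_not_contains, List.map_map, Function.comp]; try rfl)

def pvAstep2 (p : PySem.Dict String Int) (bf af : String) (cutsAll : List (String × String × String × String)) (upd : PySem.Dict String (List (String × List String))) (e : String × List (String × List String)) : PySem.Dict String (List (String × List String)) :=
  let node := e.1
  let constraints := PySem.Dict.mk e.2
  let updated_constraints : PySem.Dict String (List String) := PySem.Dict.empty
  let updated_constraints :=
    if constraints.contains bf then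
      let updated_before := (constraints.getD bf []).foldl (fun acc before_item =>
        let should_cut := cutsAll.any (fun cut =>
          cut.1 == before_item && cut.2.1 == node && cut.2.2.2 == before_item)
        if !should_cut then acc ++ [before_item] else acc) []
      updated_constraints.insert bf updated_before
    else updated_constraints
  let updated_constraints :=
    if constraints.contains af then
      let updated_after := (constraints.getD af []).foldl (fun acc after_item =>
        let should_cut := cutsAll.any (fun cut =>
          cut.1 == node && cut.2.1 == after_item && cut.2.2.2 == after_item)
        if !should_cut then acc ++ [after_item] else acc) []
      updated_constraints.insert af updated_after
    else updated_constraints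
  let updated_constraints := constraints.items.foldl (fun uc fv =>
    if fv.1 == bf || fv.1 == af then uc else uc.insert fv.1 fv.2) updated_constraints
  upd.insert node updated_constraints.items

def pvBstep (p : PySem.Dict String Int) (bf af : String) (st : (List (String × String × String)) × PySem.Dict String (List (String × List String))) (e : String × List (String × List String)) : (List (String × String × String)) × PySem.Dict String (List (String × List String)) :=
  let node := e.1
  let constraints := PySem.Dict.mk e.2
  let pos := p.get? node
  let new_c : PySem.Dict String (List String) := PySem.Dict.empty
  let st1 :=
    if constraints.contains bf then
      let ck := (constraints.getD bf []).foldl (fun s b =>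
        if pos.isSome && p.contains b && decide (p.getD b 0 > pos.getD 0) then
          (s.1 ++ [(b, node, node ++ "." ++ bf)], s.2)
        else (s.1, s.2 ++ [b])) (st.1, [])
      (ck.1, new_c.insert bf ck.2)
    else (st.1, new_c)
  let st2 :=
    if constraints.contains af then
      let ck := (constraints.getD af []).foldl (fun s a =>
        if pos.isSome && p.contains a && decide (p.getD a 0 < pos.getD 0) then
          (s.1 ++ [(node, a, node ++ "." ++ af)], s.2)
        else (s.1, s.2 ++ [a])) (st1.1, [])
      (ck.1, st1.2.insert af ck.2)
    else (st1.1, st1.2)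
  let new_c2 := constraints.items.foldl (fun uc fv =>
    if fv.1 == bf || fv.1 == af then uc else uc.insert fv.1 fv.2) st2.2
  (st2.1, st.2.insert node new_c2.items)

lemma pv_A_unfold (cl : List String) (nd : List (String × List (String × List String))) (bf af : String) (cab : Bool) :
    find_minimal_constraint_cuts cl nd bf af cab
    = ((pvAcuts (pvPositions cl) bf af cab nd).map (fun cut => (cut.1, cut.2.1, cut.2.2.1)),
       (nd.foldl (pvAstep2 (pvPositions cl) bf af (pvAcuts (pvPositions cl) bf af cab nd)) PySem.Dict.empty).items) := rfl

lemma pv_B_unfold (cl : List String) (nd : List (String × List (String × List String))) (bf af : String) (cab : Bool) :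
    find_minimal_constraint_cuts_alt cl nd bf af cab
    = ((nd.foldl (pvBstep (pvPositions cl) bf af) ([], PySem.Dict.empty)).1,
       (nd.foldl (pvBstep (pvPositions cl) bf af) ([], PySem.Dict.empty)).2.items) := rfl

lemma pv_Astep2_eq (p : PySem.Dict String Int) (bf af : String) (nd : List (String × List (String × List String)))
    (upd : PySem.Dict String (List (String × List String))) (e : String × List (String × List String)) (he : e ∈ nd) :
    pvAstep2 p bf af (nd.flatMap (pvCuts4 p bf af)) upd e = upd.insert e.1 (pvUpd p bf af e) := by
  unfold pvAstep2 pvUpd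
  simp only []
  congr 1
  have hbefore : ((PySem.Dict.mk e.2).getD bf []).foldl (fun acc before_item =>
      if !((nd.flatMap (pvCuts4 p bf af)).any (fun cut =>
        cut.1 == before_item && cut.2.1 == e.1 && cut.2.2.2 == before_item)) then acc ++ [before_item] else acc) []
      = ((PySem.Dict.mk e.2).getD bf []).filter (fun b => !(p.contains e.1 && pvCondB p (p.getD e.1 0) b)) := by
    rw [PySem.List.foldl_append_if_eq_filter]
    rw [List.nil_append]
    exact List.filter_congr (fun b hb => by rw [pv_loc_before p bf af nd e he b hb])
  have hafter : ((PySem.Dict.mk e.2).getD af []).foldl (fun acc after_item =>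
      if !((nd.flatMap (pvCuts4 p bf af)).any (fun cut =>
        cut.1 == e.1 && cut.2.1 == after_item && cut.2.2.2 == after_item)) then acc ++ [after_item] else acc) []
      = ((PySem.Dict.mk e.2).getD af []).filter (fun a => !(p.contains e.1 && pvCondA p (p.getD e.1 0) a)) := by
    rw [PySem.List.foldl_append_if_eq_filter]
    rw [List.nil_append]
    exact List.filter_congr (fun a ha => by rw [pv_loc_after p bf af nd e he a ha])
  rw [hbefore, hafter]

lemma pv_Bstep_eq (p : PySem.Dict String Int) (bf af : String)
    (st : (List (String × String × String)) × PySem.Dict String (List (String × List String)))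
    (e : String × List (String × List String)) :
    pvBstep p bf af st e = (st.1 ++ pvCuts3 p bf af e, st.2.insert e.1 (pvUpd p bf af e)) := by
  unfold pvBstep pvCuts3 pvUpd
  simp only []
  have hcond : ∀ (cmp : Int → Int → Bool) (b : String),
      ((p.get? e.1).isSome && p.contains b && cmp (p.getD b 0) ((p.get? e.1).getD 0))
      = (p.contains e.1 && (p.contains b && cmp (p.getD b 0) (p.getD e.1 0))) := by
    intro cmp b
    rw [PySem.Dict.contains_eq_isSome_get? p e.1, PySem.Dict.getD_eq_get?_getD p e.1 0, Bool.and_assoc]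
  have hsplit : ∀ (c3 : String → String × String × String) (q : String → Bool)
      (l : List String) (cuts : List (String × String × String)),
      l.foldl (fun s b => if q b then (s.1 ++ [c3 b], s.2) else (s.1, s.2 ++ [b])) (cuts, ([] : List String))
      = (cuts ++ (l.filter q).map c3, l.filter (fun b => !q b)) := by
    intro c3 q l cuts
    have h1 : (fun (s : List (String × String × String) × List String) b =>
        if q b then (s.1 ++ [c3 b], s.2) else (s.1, s.2 ++ [b]))
        = (fun s b => ((if q b then s.1 ++ [c3 b] else s.1), (if !q b then s.2 ++ [b] else s.2))) := by
      funext s b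
      cases hq : q b <;> simp
    rw [h1]
    rw [PySem.List.foldl_prod_mk (f := fun acc b => if q b then acc ++ [c3 b] else acc)
      (g := fun acc b => if !q b then acc ++ [b] else acc)]
    rw [PySem.List.foldl_append_if, PySem.List.foldl_append_if_eq_filter, List.nil_append]
  have hcondB : ∀ b, ((p.get? e.1).isSome && p.contains b && decide (p.getD b 0 > (p.get? e.1).getD 0))
      = (p.contains e.1 && pvCondB p (p.getD e.1 0) b) := fun b => hcond (fun x y => decide (x > y)) b
  have hcondA : ∀ a, ((p.get? e.1).isSome && p.contains a && decide (p.getD a 0 < (p.get? e.1).getD 0))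
      = (p.contains e.1 && pvCondA p (p.getD e.1 0) a) := fun a => hcond (fun x y => decide (x < y)) a
  simp only [hcondB, hcondA]
  simp only [hsplit]
  by_cases hbf : (PySem.Dict.mk e.2).contains bf = true <;>
    by_cases haf : (PySem.Dict.mk e.2).contains af = true <;>
      simp [hbf, haf, List.append_assoc]

lemma pv_A_eq (cl : List String) (nd : List (String × List (String × List String))) (bf af : String) (cab : Bool) :
    find_minimal_constraint_cuts cl nd bf af cab
    = ((nd.flatMap (pvCuts4 (pvPositions cl) bf af)).map (fun c => (c.1, c.2.1, c.2.2.1)),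
       (nd.foldl (fun d e => d.insert e.1 (pvUpd (pvPositions cl) bf af e)) PySem.Dict.empty).items) := by
  rw [pv_A_unfold, pv_cutsA]
  refine congrArg₂ Prod.mk rfl ?_
  refine congrArg (fun d => PySem.Dict.items d) ?_
  exact PySem.List.foldl_congr_mem nd _ _ _ (fun upd e he => pv_Astep2_eq (pvPositions cl) bf af nd upd e he)

lemma pv_B_eq (cl : List String) (nd : List (String × List (String × List String))) (bf af : String) (cab : Bool) :
    find_minimal_constraint_cuts_alt cl nd bf af cab
    = (nd.flatMap (pvCuts3 (pvPositions cl) bf af),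
       (nd.foldl (fun d e => d.insert e.1 (pvUpd (pvPositions cl) bf af e)) PySem.Dict.empty).items) := by
  rw [pv_B_unfold]
  rw [PySem.List.foldl_congr_mem nd (pvBstep (pvPositions cl) bf af)
    (fun st e => (st.1 ++ pvCuts3 (pvPositions cl) bf af e, st.2.insert e.1 (pvUpd (pvPositions cl) bf af e)))
    ([], PySem.Dict.empty) (fun st e _ => pv_Bstep_eq (pvPositions cl) bf af st e)]
  rw [PySem.List.foldl_prod_mk (f := fun acc e => acc ++ pvCuts3 (pvPositions cl) bf af e)
    (g := fun (acc : PySem.Dict String (List (String × List String))) e => acc.insert e.1 (pvUpd (pvPositions cl) bf af e))]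
  rw [PySem.List.foldl_append_eq_flatMap, List.nil_append]

-- ===== VERDICT (by name: the statement is the Claim_ definition above) =====
theorem find_minimal_constraint_cuts_spec : Claim_equal_find_minimal_constraint_cuts := by
  intro cl nd bf af cab _
  unfold Spec_find_minimal_constraint_cuts
  rw [pv_A_eq, pv_B_eq]
  have h1 : (nd.flatMap (pvCuts4 (pvPositions cl) bf af)).map (fun c => (c.1, c.2.1, c.2.2.1))
      = nd.flatMap (pvCuts3 (pvPositions cl) bf af) := by
    rw [List.map_flatMap]
    exact congrArg (fun f => List.flatMap f nd) (funext (pv_cuts3_eq (pvPositions cl) bf af))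
  rw [h1]
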